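-- pv_equiv track=rewrite | github.com/sundar91/dsa | Sorting/sumdifference.py | solve
-- ===== SOURCE A (Python) =====
-- def solve(A):
--     mod = pow(10, 9) + 7
--     n = len(A)
--     A.sort()
--     maxSum, minSum = 0, 0
--     for i in range(n):
--         maxSum += (A[i] * (1 << i)) % mod
--         minSum += (A[i] * (1 << (n - i - 1))) % mod
--
--     res = (maxSum - minSum) % mod
--     return res
-- ===== SOURCE B (Python) =====
-- def solve(A):
--     mod = 10 ** 9 + 7
--     A.sort()
--     hi = 0
--     for a in reversed(A):
--         hi = (hi * 2 + a) % mod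
--     lo = 0
--     for a in A:
--         lo = (lo * 2 + a) % mod
--     return (hi - lo) % mod
-- ===== Notes on version B (the rewrite author's own statement) =====
-- stated objective: faster
-- what changed: replaces A's indexed loop with per-term big-integer shifts (1 << i) by two index-free Horner evaluations of the sorted list (one over the reversed list for the max sum, one forward for the min sum), each kept reduced modulo 10^9+7 at every step
import Mathlib
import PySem

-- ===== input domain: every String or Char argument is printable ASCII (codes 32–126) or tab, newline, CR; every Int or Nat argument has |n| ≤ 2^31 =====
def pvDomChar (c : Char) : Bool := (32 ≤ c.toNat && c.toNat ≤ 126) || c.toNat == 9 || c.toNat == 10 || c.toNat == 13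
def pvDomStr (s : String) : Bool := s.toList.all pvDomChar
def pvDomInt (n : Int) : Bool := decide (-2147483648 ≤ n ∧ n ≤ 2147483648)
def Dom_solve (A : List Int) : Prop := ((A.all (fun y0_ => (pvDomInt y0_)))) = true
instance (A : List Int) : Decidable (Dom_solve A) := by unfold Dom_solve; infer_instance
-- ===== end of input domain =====

-- B replaces A's indexed loop with big-integer shifts (1 << i) by two index-free Horner
-- evaluations modulo 10^9+7; both Pythons sort A in place (same mutation), the equivalence
-- proved here is about the return value.

-- ===== PORT A =====
def solve (A : List Int) : Int :=
  let md : Int := 10 ^ 9 + 7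
  let n : Int := PySem.List.len A
  let s : List Int := PySem.List.sorted A (fun x => x) false
  let p := (PySem.List.pyRange 0 n 1).foldl
    (fun (st : Int × Int) i =>
      (st.1 + PySem.Int.mod (PySem.List.pyGetD s i 0 * ((1 : Int) <<< i.toNat)) md,
       st.2 + PySem.Int.mod (PySem.List.pyGetD s i 0 * ((1 : Int) <<< (n - i - 1).toNat)) md))
    (0, 0)
  PySem.Int.mod (p.1 - p.2) md

-- ===== PORT B =====
def solve_alt (A : List Int) : Int :=
  let md : Int := 10 ^ 9 + 7
  let s : List Int := PySem.List.sorted A (fun x => x) false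
  let hi := s.reverse.foldl (fun h a => PySem.Int.mod (h * 2 + a) md) 0
  let lo := s.foldl (fun l a => PySem.Int.mod (l * 2 + a) md) 0
  PySem.Int.mod (hi - lo) md

-- ===== PRECONDITION & SPEC =====
def Spec_solve (A : List Int) (out : Int) : Prop := out = solve_alt A
instance (A : List Int) (out : Int) : Decidable (Spec_solve A out) := by unfold Spec_solve; infer_instance

-- ===== CLAIM (what is proved, stated in full; the proofs are below) =====
def Claim_equal_solve : Prop := ∀ (A : List Int), Dom_solve A → Spec_solve A (solve A)

-- ===== LEMMAS AND PROOFS =====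

-- 1 << k on Int is 2^k
theorem pv_shl_one (k : Nat) : (1 : Int) <<< k = 2 ^ k := by
  rw [← Int.shiftLeft_natCast_right, Int.shiftLeft_eq_mul_pow]; push_cast; ring

-- closed form of A's loop (two independent running sums of per-term residues)
theorem pv_foldA (s : List Int) (m W : Int) (hm : 0 < m) (n : Nat) :
    (PySem.List.pyRange 0 (n : Int) 1).foldl
      (fun (st : Int × Int) i =>
        (st.1 + PySem.Int.mod (PySem.List.pyGetD s i 0 * ((1 : Int) <<< i.toNat)) m,
         st.2 + PySem.Int.mod (PySem.List.pyGetD s i 0 * ((1 : Int) <<< (W - i - 1).toNat)) m))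
      (0, 0)
    = (∑ k ∈ Finset.range n, (s.getD k 0 * 2 ^ k) % m,
       ∑ k ∈ Finset.range n, (s.getD k 0 * 2 ^ ((W - k - 1 : Int)).toNat) % m) := by
  induction n with
  | zero => simp [PySem.List.pyRange_one_eq_nil]
  | succ n ih =>
      rw [show ((n + 1 : Nat) : Int) = (n : Int) + 1 by push_cast; ring,
          PySem.List.pyRange_one_succ_right (by positivity), List.foldl_append, ih]
      simp [Finset.sum_range_succ, PySem.List.pyGetD_natCast, pv_shl_one,
            PySem.Int.mod_eq_emod_of_pos hm]

-- Horner's scheme with per-step reduction, generalized over the initial accumulator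
theorem pv_horner (m : Int) (hm : 0 < m) (l : List Int) (c : Int) :
    Int.ModEq m (l.foldl (fun h a => PySem.Int.mod (h * 2 + a) m) c)
      (c * 2 ^ l.length + ∑ k ∈ Finset.range l.length, l.getD k 0 * 2 ^ (l.length - 1 - k)) := by
  induction l generalizing c with
  | nil => simp
  | cons a l ih =>
      simp only [List.foldl_cons, List.length_cons]
      refine (ih (PySem.Int.mod (c * 2 + a) m)).trans ?_
      have h1 : Int.ModEq m (PySem.Int.mod (c * 2 + a) m) (c * 2 + a) := by
        rw [PySem.Int.mod_eq_emod_of_pos hm]; exact Int.emod_emod_of_dvd _ dvd_rfl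
      refine ((h1.mul_right (2 ^ l.length)).add_right _).trans ?_
      rw [Finset.sum_range_succ']
      have hsum : ∀ k ∈ Finset.range l.length,
          (a :: l).getD (k + 1) 0 * 2 ^ (l.length + 1 - 1 - (k + 1))
            = l.getD k 0 * 2 ^ (l.length - 1 - k) := by
        intro k hk
        simp only [List.getD_cons_succ]
        rw [show l.length + 1 - 1 - (k + 1) = l.length - 1 - k by omega]
      rw [Finset.sum_congr rfl hsum]
      simp only [List.getD_cons_zero]
      have : l.length + 1 - 1 - 0 = l.length := by omega
      rw [this]
      ring_nf
      rfl

theorem pv_getD_reverse (l : List Int) (k : Nat) (h : k < l.length) :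
    l.reverse.getD k 0 = l.getD (l.length - 1 - k) 0 := by
  rw [List.getD_eq_getElem _ _ (by simpa using h), List.getD_eq_getElem _ _ (by omega),
      List.getElem_reverse]

theorem pv_solve_eq (A : List Int) : solve A = solve_alt A := by
  have hm : (0 : Int) < 10 ^ 9 + 7 := by norm_num
  simp only [solve, solve_alt, PySem.List.len_eq]
  set s := PySem.List.sorted A (fun x => x) false with hs
  set N := A.length with hNdef
  have hsl : s.length = N := by rw [hs, PySem.List.length_sorted]
  rw [pv_foldA s (10 ^ 9 + 7) (N : Int) hm N]
  have hhi := pv_horner (10 ^ 9 + 7) hm s.reverse 0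
  have hlo := pv_horner (10 ^ 9 + 7) hm s 0
  rw [List.length_reverse, hsl] at hhi
  rw [hsl] at hlo
  simp only [zero_mul, zero_add] at hhi hlo
  -- identify the two Horner sums with A's sums
  have hrev : (∑ k ∈ Finset.range N, s.reverse.getD k 0 * 2 ^ (N - 1 - k))
      = ∑ k ∈ Finset.range N, s.getD k 0 * 2 ^ k := by
    rw [← Finset.sum_range_reflect (fun j => s.getD j 0 * 2 ^ j) N]
    refine Finset.sum_congr rfl fun k hk => ?_
    have hkN : k < N := Finset.mem_range.mp hk
    rw [pv_getD_reverse s k (by omega), hsl]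
  have hhi' : Int.ModEq (10 ^ 9 + 7)
      (s.reverse.foldl (fun h a => PySem.Int.mod (h * 2 + a) (10 ^ 9 + 7)) 0)
      (∑ k ∈ Finset.range N, s.getD k 0 * 2 ^ k) := hrev ▸ hhi
  have heq : (∑ k ∈ Finset.range N, s.getD k 0 * 2 ^ (N - 1 - k))
      = ∑ k ∈ Finset.range N, s.getD k 0 * 2 ^ (((N : Int) - k - 1)).toNat := by
    refine Finset.sum_congr rfl fun k hk => ?_
    have hkN : k < N := Finset.mem_range.mp hk
    rw [show (((N : Int) - k - 1)).toNat = N - 1 - k by omega]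
  have hlo' : Int.ModEq (10 ^ 9 + 7)
      (s.foldl (fun l a => PySem.Int.mod (l * 2 + a) (10 ^ 9 + 7)) 0)
      (∑ k ∈ Finset.range N, s.getD k 0 * 2 ^ (((N : Int) - k - 1)).toNat) := heq ▸ hlo
  have hmod : ∀ f : Nat → Int,
      Int.ModEq (10 ^ 9 + 7) (∑ k ∈ Finset.range N, f k % (10 ^ 9 + 7)) (∑ k ∈ Finset.range N, f k) :=
    fun f => (Finset.sum_int_mod _ _ _).symm
  have hfin : Int.ModEq (10 ^ 9 + 7)
      ((∑ k ∈ Finset.range N, (s.getD k 0 * 2 ^ k) % (10 ^ 9 + 7))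
        - (∑ k ∈ Finset.range N, (s.getD k 0 * 2 ^ (((N : Int) - k - 1)).toNat) % (10 ^ 9 + 7)))
      ((s.reverse.foldl (fun h a => PySem.Int.mod (h * 2 + a) (10 ^ 9 + 7)) 0)
        - (s.foldl (fun l a => PySem.Int.mod (l * 2 + a) (10 ^ 9 + 7)) 0)) :=
    ((hmod _).trans hhi'.symm).sub ((hmod _).trans hlo'.symm)
  rw [PySem.Int.mod_eq_emod_of_pos hm, PySem.Int.mod_eq_emod_of_pos hm]
  exact hfin

-- ===== VERDICT (by name: the statement is the Claim_ definition above) =====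
theorem solve_spec : Claim_equal_solve := by
  intro A _
  unfold Spec_solve
  exact pv_solve_eq A
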